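-- pv_equiv track=rewrite | github.com/gwarmstrong/taxanet | kraken_net.py | _preoder_traversal_tuples
-- ===== SOURCE A (Python) =====
-- def _preoder_traversal_tuples(nodes, root=1, order=None):
--     """
--     TODO assumes that 1 is the root of the tree
--     Parameters
--     ----------
--     nodes
--
--     Returns
--     -------
--
--     """
--     if order is None:
--         order = []
--     if root in nodes:
--         for child in nodes[root]:
--             order.append((root, child))
--             _preoder_traversal_tuples(nodes, root=child, order=order)
--     return order
-- ===== SOURCE B (Python) =====
-- def _preoder_traversal_tuples(nodes, root=1, order=None):
--     if order is None:
--         order = []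
--     stack = [(None, root)]
--     while stack:
--         parent, node = stack.pop()
--         if parent is not None:
--             order.append((parent, node))
--         if node in nodes:
--             for child in reversed(nodes[node]):
--                 stack.append((node, child))
--     return order
-- ===== Notes on version B (the rewrite author's own statement) =====
-- stated objective: alternative
-- what changed: Replaces A's recursive preorder edge collector with an iterative DFS over an explicit stack seeded with (None, root), popping (parent, node) pairs, skipping the root's None edge and pushing children in reversed order so they pop left-to-right.
import Mathlib
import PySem

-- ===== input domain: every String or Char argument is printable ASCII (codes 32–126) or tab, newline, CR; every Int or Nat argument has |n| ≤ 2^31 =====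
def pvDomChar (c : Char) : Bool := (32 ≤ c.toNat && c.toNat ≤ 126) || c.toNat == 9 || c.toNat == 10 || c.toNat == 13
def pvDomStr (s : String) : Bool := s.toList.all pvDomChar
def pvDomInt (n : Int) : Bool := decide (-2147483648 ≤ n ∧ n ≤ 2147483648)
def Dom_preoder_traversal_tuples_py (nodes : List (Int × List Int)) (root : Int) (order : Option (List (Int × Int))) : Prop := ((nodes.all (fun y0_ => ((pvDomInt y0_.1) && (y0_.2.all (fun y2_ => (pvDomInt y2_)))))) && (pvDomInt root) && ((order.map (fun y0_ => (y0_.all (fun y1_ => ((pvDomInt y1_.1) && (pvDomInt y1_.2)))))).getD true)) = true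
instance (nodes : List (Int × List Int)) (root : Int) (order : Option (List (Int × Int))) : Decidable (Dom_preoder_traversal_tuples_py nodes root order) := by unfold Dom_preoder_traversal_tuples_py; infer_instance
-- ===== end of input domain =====

-- B replaces A's recursion by an iterative explicit-stack DFS (same return value; like A it
-- appends to the caller-supplied `order` list in place — the equivalence proved is about the
-- return value). Lean ports are fueled to be total; Pre_ excludes only the inputs on which
-- the Pythons never return (a cycle reachable from the root: A recurses forever).


-- first-match lookup in the adjacency association list ('root in nodes' / 'nodes[root]'),
-- shared by both ports (Python dict lookup)
def pvLookup (nodes : List (Int × List Int)) (k : Int) : Option (List Int) :=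
  (nodes.find? (fun p => p.1 == k)).map (fun p => p.2)

-- ===== PORT A =====
-- recursive collector; the fuel argument only makes the recursion total (one unit per call
-- depth; nodes.length + 1 suffices under Pre_, the 0 case is never reached there)
def preA_go (nodes : List (Int × List Int)) : Nat → Int → List (Int × Int) → List (Int × Int)
  | 0, _, order => order
  | fuel+1, root, order =>
    match pvLookup nodes root with
    | none => order
    | some children =>
        children.foldl (fun ord child => preA_go nodes fuel child (ord ++ [(root, child)])) order

def preoder_traversal_tuples_py (nodes : List (Int × List Int)) (root : Int) (order : Option (List (Int × Int))) : List (Int × Int) :=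
  preA_go nodes (nodes.length + 1) root (order.getD [])

-- ===== PORT B =====
-- fuel for B's while-loop: one unit per pop; preB_cnt computes (with depth fuel) the number
-- of pops the traversal from a node needs — a totality guard only, not part of the algorithm
def preB_cnt (nodes : List (Int × List Int)) : Nat → Int → Nat
  | 0, _ => 1
  | fuel+1, node =>
    match pvLookup nodes node with
    | none => 1
    | some children => children.foldl (fun acc c => acc + preB_cnt nodes fuel c) 1

-- the while loop; the stack is kept top-at-head, so Python's extend of reversed(children)
-- onto the tail-top list is exactly `children.map … ++ rest` here
def preB_go (nodes : List (Int × List Int)) : Nat → List (Option Int × Int) → List (Int × Int) → List (Int × Int)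
  | 0, _, order => order
  | _+1, [], order => order
  | fuel+1, (parent, node) :: rest, order =>
    let order' := match parent with
      | some p => order ++ [(p, node)]
      | none => order
    let stack' := match pvLookup nodes node with
      | some children => children.map (fun c => (some node, c)) ++ rest
      | none => rest
    preB_go nodes fuel stack' order'

def preoder_traversal_tuples_py_alt (nodes : List (Int × List Int)) (root : Int) (order : Option (List (Int × Int))) : List (Int × Int) :=
  preB_go nodes (preB_cnt nodes (nodes.length + 1) root) [(none, root)] (order.getD [])

-- ===== PRECONDITION & SPEC =====
-- successors of a node (empty when it is not a key), and bounded reachability: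
-- pvReach f a b = 'there is a path of at least one and at most f edges from a to b'
def pvSuccs (nodes : List (Int × List Int)) (n : Int) : List Int :=
  (pvLookup nodes n).getD []

def pvReach (nodes : List (Int × List Int)) : Nat → Int → Int → Bool
  | 0, _, _ => false
  | f+1, a, b => (pvSuccs nodes a).any (fun c => c == b || pvReach nodes f c b)

-- Pre_ excludes exactly the inputs on which A recurses forever (RecursionError): those where
-- some key reachable from the root (or the root itself) lies on a cycle. Simple paths visit
-- distinct keys, so fuel nodes.length decides both reachability and cyclicity exactly.
def Pre_preoder_traversal_tuples_py (nodes : List (Int × List Int)) (root : Int) (order : Option (List (Int × Int))) : Prop :=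
  ∀ p ∈ nodes, (root = p.1 ∨ pvReach nodes nodes.length root p.1 = true) →
    pvReach nodes nodes.length p.1 p.1 = false

instance (nodes : List (Int × List Int)) (root : Int) (order : Option (List (Int × Int))) : Decidable (Pre_preoder_traversal_tuples_py nodes root order) := by
  unfold Pre_preoder_traversal_tuples_py; infer_instance

def pvWitness_preoder_traversal_tuples_py : (List (Int × List Int)) × Int × (Option (List (Int × Int))) :=
  ([(1, [2, 3]), (2, [4]), (3, [])], 1, none)

def Spec_preoder_traversal_tuples_py (nodes : List (Int × List Int)) (root : Int) (order : Option (List (Int × Int))) (out : List (Int × Int)) : Prop := out = preoder_traversal_tuples_py_alt nodes root order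
instance (nodes : List (Int × List Int)) (root : Int) (order : Option (List (Int × Int))) (out : List (Int × Int)) : Decidable (Spec_preoder_traversal_tuples_py nodes root order out) := by unfold Spec_preoder_traversal_tuples_py; infer_instance

-- ===== CLAIM (what is proved, stated in full; the proofs are below) =====
def Claim_equal_preoder_traversal_tuples_py : Prop := ∀ (nodes : List (Int × List Int)) (root : Int) (order : Option (List (Int × Int))), Dom_preoder_traversal_tuples_py nodes root order → Pre_preoder_traversal_tuples_py nodes root order → Spec_preoder_traversal_tuples_py nodes root order (preoder_traversal_tuples_py nodes root order)

-- ===== LEMMAS AND PROOFS =====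

-- pure edge list of the preorder traversal from n, depth-fueled
def pvE (nodes : List (Int × List Int)) : Nat → Int → List (Int × Int)
  | 0, _ => []
  | fuel+1, n =>
    match pvLookup nodes n with
    | none => []
    | some cs => cs.flatMap (fun c => (n, c) :: pvE nodes fuel c)

-- an edge relation path from the root to its last element, through pairwise-distinct
-- vertices all of which (except possibly the last) are keys
def pvInv (nodes : List (Int × List Int)) (root : Int) (p : List Int) : Prop :=
  p ≠ [] ∧ p.head? = some root ∧ List.IsChain (fun a b => b ∈ pvSuccs nodes a) p ∧
    p.Nodup ∧ p.dropLast ⊆ nodes.map Prod.fst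

lemma pvLookup_isKey (nodes : List (Int × List Int)) (n : Int) (cs : List Int)
    (h : pvLookup nodes n = some cs) : n ∈ nodes.map Prod.fst := by
  unfold pvLookup at h
  cases hf : nodes.find? (fun p => p.1 == n) with
  | none => simp [hf] at h
  | some pr =>
    have hm := List.mem_of_find?_eq_some hf
    have he : pr.1 = n := by simpa using List.find?_some hf
    exact he ▸ List.mem_map_of_mem hm

lemma pvNodup_subset_length {l l' : List Int} (hn : l.Nodup) (hs : l ⊆ l') :
    l.length ≤ l'.length := by
  calc l.length = l.toFinset.card := (List.toFinset_card_of_nodup hn).symm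
    _ ≤ l'.toFinset.card := Finset.card_le_card (fun x hx => by
        simp only [List.mem_toFinset] at *; exact hs hx)
    _ ≤ l'.length := List.toFinset_card_le l'

-- a concrete edge path yields bounded reachability
lemma pvReach_of_path (nodes : List (Int × List Int)) :
    ∀ (q : List Int) (a b : Int), List.IsChain (fun x y => y ∈ pvSuccs nodes x) (a :: q) →
      (a :: q).getLast? = some b → q ≠ [] → pvReach nodes q.length a b = true := by
  intro q
  induction q with
  | nil => intro a b _ _ hne; exact absurd rfl hne
  | cons c q' ih =>
    intro a b hch hlast _
    cases q' with
    | nil =>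
      have hedge : c ∈ pvSuccs nodes a := List.rel_of_isChain_cons_cons hch
      have hb : c = b := by simpa using hlast
      subst hb
      simp only [pvReach, List.length_cons, List.length_nil]
      exact List.any_eq_true.mpr ⟨c, hedge, by simp⟩
    | cons x xs =>
      have hedge : c ∈ pvSuccs nodes a := List.rel_of_isChain_cons_cons hch
      have hr := ih c b (List.isChain_cons.mp hch).2
        (by rw [← hlast]; simp [List.getLast?_cons_cons]) (by simp)
      simp only [pvReach, List.length_cons] at hr ⊢
      exact List.any_eq_true.mpr ⟨c, hedge, by simp [hr]⟩

lemma pvReach_mono (nodes : List (Int × List Int)) :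
    ∀ f g a b, f ≤ g → pvReach nodes f a b = true → pvReach nodes g a b = true := by
  intro f
  induction f with
  | zero => intro g a b _ h; simp [pvReach] at h
  | succ f ih =>
    intro g a b hle h
    obtain ⟨g, rfl⟩ := Nat.exists_eq_succ_of_ne_zero (by omega : g ≠ 0)
    simp only [pvReach, List.any_eq_true] at h ⊢
    obtain ⟨c, hc, hcb⟩ := h
    refine ⟨c, hc, ?_⟩
    rcases Bool.or_eq_true_iff.mp hcb with h1 | h2
    · simp [h1]
    · simp [ih g c b (by omega) h2]

-- under Pre_, a valid path cannot be extended into a repeated vertex: freshness of children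
lemma pvFresh (nodes : List (Int × List Int)) (root : Int)
    (hPre : ∀ p ∈ nodes, (root = p.1 ∨ pvReach nodes nodes.length root p.1 = true) →
      pvReach nodes nodes.length p.1 p.1 = false) :
    ∀ p n cs c, pvInv nodes root p → p.getLast? = some n →
      pvLookup nodes n = some cs → c ∈ cs → c ∉ p := by
  intro p n cs c hinv hlast hlook hc hmem
  obtain ⟨hne, hhead, hch, hnd, hkeys⟩ := hinv
  -- every element of p is a key: dropLast ones by hkeys, the last (= n) has a lookup
  have hnkey : n ∈ nodes.map Prod.fst := pvLookup_isKey nodes n cs hlook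
  have hsplit : p.dropLast ++ [n] = p :=
    List.dropLast_append_getLast? n (Option.mem_def.mpr hlast)
  have hallkeys : ∀ x ∈ p, x ∈ nodes.map Prod.fst := by
    intro x hx
    rw [← hsplit] at hx
    rcases List.mem_append.mp hx with h | h
    · exact hkeys h
    · have hxn : x = n := by simpa using h
      rw [hxn]; exact hnkey
  -- c is a key
  have hckey : c ∈ nodes.map Prod.fst := hallkeys c hmem
  obtain ⟨pr, hpr, hpr1⟩ := List.mem_map.mp hckey
  -- split p at (the first) occurrence of c
  obtain ⟨s, v, hp⟩ := List.append_of_mem hmem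
  -- the path from c to n within p
  have hlast_cv : (c :: v).getLast? = some n := by
    rw [hp, List.getLast?_append_cons] at hlast
    exact hlast
  have hch_cv : List.IsChain (fun x y => y ∈ pvSuccs nodes x) (c :: v) :=
    (hp ▸ hch).suffix ⟨s, rfl⟩
  -- cycle c →* n → c, of length (v.length + 1) ≤ nodes.length
  have hedge_nc : c ∈ pvSuccs nodes n := by simp [pvSuccs, hlook, hc]
  have hch_cyc : List.IsChain (fun x y => y ∈ pvSuccs nodes x) ((c :: v) ++ [c]) := by
    apply List.IsChain.append hch_cv (List.isChain_singleton c)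
    intro x hx y hy
    have hx' : x = n := by rw [hlast_cv] at hx; exact (by simpa using hx : n = x).symm
    have hy' : y = c := (by simpa using hy : c = y).symm
    rw [hx', hy']; exact hedge_nc
  have hcyc : pvReach nodes (v ++ [c]).length c c = true := by
    have := pvReach_of_path nodes (v ++ [c]) c c hch_cyc
      (by rw [show c :: (v ++ [c]) = (c :: v) ++ [c] from rfl, List.getLast?_concat]) (by simp)
    exact this
  have hcvnd : (c :: v).Nodup := (hp ▸ hnd).sublist (List.sublist_append_right s _)
  have hcvlen : (c :: v).length ≤ nodes.length := by
    have := pvNodup_subset_length hcvnd (fun x hx => hallkeys x (hp ▸ List.mem_append_right s hx))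
    simpa [List.length_map] using this
  have hcycL : pvReach nodes nodes.length c c = true :=
    pvReach_mono nodes _ _ c c (by simp at hcvlen ⊢; omega) hcyc
  -- c is reachable from (or equal to) root
  have hroot : root = c ∨ pvReach nodes nodes.length root c = true := by
    cases hs : s with
    | nil =>
      left
      have : p.head? = some c := by rw [hp, hs]; simp
      exact Option.some.inj (hhead.symm.trans this)
    | cons r s' =>
      right
      have hr : r = root := by
        have : p.head? = some r := by rw [hp, hs]; simp
        exact Option.some.inj (this.symm.trans hhead)
      -- path root →* c along s ++ [c], a prefix of p
      have hch_sc : List.IsChain (fun x y => y ∈ pvSuccs nodes x) (s ++ [c]) := by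
        apply (hp ▸ hch).prefix
        exact ⟨v, by simp⟩
      have hlen_s : s.length ≤ nodes.length := by
        have hsnd : s.Nodup := (hp ▸ hnd).sublist (List.sublist_append_left s (c :: v))
        have hssub : ∀ x ∈ s, x ∈ nodes.map Prod.fst := by
          intro x hx
          exact hallkeys x (hp ▸ List.mem_append_left _ hx)
        have := pvNodup_subset_length hsnd hssub
        simpa [List.length_map] using this
      have := pvReach_of_path nodes (s' ++ [c]) r c
        (by rw [hs] at hch_sc; exact hch_sc)
        (by rw [show r :: (s' ++ [c]) = (r :: s') ++ [c] from rfl, List.getLast?_concat]) (by simp)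
      rw [hr] at this
      apply pvReach_mono nodes _ _ root c ?_ this
      rw [hs] at hlen_s; simp at hlen_s ⊢; omega
  have := hPre pr hpr (by rw [hpr1]; exact hroot)
  rw [hpr1] at this
  exact absurd hcycL (by simp [this])

lemma pvInv_extend (nodes : List (Int × List Int)) (root : Int)
    (hPre : ∀ p ∈ nodes, (root = p.1 ∨ pvReach nodes nodes.length root p.1 = true) →
      pvReach nodes nodes.length p.1 p.1 = false)
    {p : List Int} {n c : Int} {cs : List Int} (hinv : pvInv nodes root p)
    (hlast : p.getLast? = some n) (hlook : pvLookup nodes n = some cs) (hc : c ∈ cs) :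
    pvInv nodes root (p ++ [c]) ∧ (p ++ [c]).getLast? = some c := by
  obtain ⟨hne, hhead, hch, hnd, hkeys⟩ := hinv
  have hfresh : c ∉ p := pvFresh nodes root hPre p n cs c ⟨hne, hhead, hch, hnd, hkeys⟩ hlast hlook hc
  have hnkey : n ∈ nodes.map Prod.fst := pvLookup_isKey nodes n cs hlook
  refine ⟨⟨by simp, ?_, ?_, ?_, ?_⟩, by simp⟩
  · cases p with
    | nil => exact absurd rfl hne
    | cons a t => simpa using hhead
  · apply List.IsChain.append hch (List.isChain_singleton c)
    intro x hx y hy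
    have hx' : x = n := by rw [hlast] at hx; exact (by simpa using hx : n = x).symm
    have hy' : y = c := (by simpa using hy : c = y).symm
    rw [hx', hy']; simp [pvSuccs, hlook, hc]
  · refine List.nodup_append'.mpr ⟨hnd, List.nodup_singleton _, ?_⟩
    intro a ha hb
    have : a = c := by simpa using hb
    exact hfresh (this ▸ ha)
  · rw [List.dropLast_concat]
    intro x hx
    have hsplit : p.dropLast ++ [n] = p :=
      List.dropLast_append_getLast? n (Option.mem_def.mpr hlast)
    rw [← hsplit] at hx
    rcases List.mem_append.mp hx with h | h
    · exact hkeys h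
    · have hxn : x = n := by simpa using h
      rw [hxn]; exact hnkey

lemma pvInv_length (nodes : List (Int × List Int)) (root : Int) {p : List Int}
    (hinv : pvInv nodes root p) : p.length ≤ nodes.length + 1 := by
  obtain ⟨hne, _, _, hnd, hkeys⟩ := hinv
  have h1 : p.dropLast.length ≤ nodes.length := by
    have := pvNodup_subset_length (hnd.sublist (List.dropLast_sublist p)) hkeys
    simpa [List.length_map] using this
  have h2 : p.dropLast.length = p.length - 1 := List.length_dropLast
  have h3 : 1 ≤ p.length := List.length_pos_iff.mpr hne
  omega

-- stability of pvE in its fuel, along any valid path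
lemma pvE_stab (nodes : List (Int × List Int)) (root : Int)
    (hPre : ∀ p ∈ nodes, (root = p.1 ∨ pvReach nodes nodes.length root p.1 = true) →
      pvReach nodes nodes.length p.1 p.1 = false) :
    ∀ k p n, nodes.length + 1 - p.length ≤ k → pvInv nodes root p → p.getLast? = some n →
      ∀ f g, nodes.length + 1 - p.length < f → nodes.length + 1 - p.length < g →
        pvE nodes f n = pvE nodes g n := by
  intro k
  induction k with
  | zero =>
    intro p n hk hinv hlast f g hf hg
    obtain ⟨f, rfl⟩ := Nat.exists_eq_succ_of_ne_zero (by omega : f ≠ 0)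
    obtain ⟨g, rfl⟩ := Nat.exists_eq_succ_of_ne_zero (by omega : g ≠ 0)
    cases h : pvLookup nodes n with
    | none => simp [pvE, h]
    | some cs =>
      cases hcs : cs with
      | nil => simp [pvE, h, hcs]
      | cons c cs' =>
        exfalso
        obtain ⟨hinv', _⟩ := pvInv_extend (c := c) nodes root hPre hinv hlast h (by rw [hcs]; exact List.mem_cons_self ..)
        have := pvInv_length nodes root hinv'
        have hlenp := pvInv_length nodes root hinv
        simp at this
        omega
  | succ k ih =>
    intro p n hk hinv hlast f g hf hg
    obtain ⟨f, rfl⟩ := Nat.exists_eq_succ_of_ne_zero (by omega : f ≠ 0)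
    obtain ⟨g, rfl⟩ := Nat.exists_eq_succ_of_ne_zero (by omega : g ≠ 0)
    cases h : pvLookup nodes n with
    | none => simp [pvE, h]
    | some cs =>
      simp only [pvE, h]
      apply List.flatMap_congr
      intro c hc
      obtain ⟨hinv', hlast'⟩ := pvInv_extend nodes root hPre hinv hlast h hc
      have hlen' := pvInv_length nodes root hinv'
      simp at hlen'
      have hlenp : 1 ≤ p.length := List.length_pos_iff.mpr hinv.1
      have hrec := ih (p ++ [c]) c (by simp; omega) hinv' hlast' f g
        (by simp; omega) (by simp; omega)
      rw [hrec]

-- stability of preB_cnt in its fuel, along any valid path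
lemma pvCnt_stab (nodes : List (Int × List Int)) (root : Int)
    (hPre : ∀ p ∈ nodes, (root = p.1 ∨ pvReach nodes nodes.length root p.1 = true) →
      pvReach nodes nodes.length p.1 p.1 = false) :
    ∀ k p n, nodes.length + 1 - p.length ≤ k → pvInv nodes root p → p.getLast? = some n →
      ∀ f g, nodes.length + 1 - p.length < f → nodes.length + 1 - p.length < g →
        preB_cnt nodes f n = preB_cnt nodes g n := by
  intro k
  induction k with
  | zero =>
    intro p n hk hinv hlast f g hf hg
    obtain ⟨f, rfl⟩ := Nat.exists_eq_succ_of_ne_zero (by omega : f ≠ 0)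
    obtain ⟨g, rfl⟩ := Nat.exists_eq_succ_of_ne_zero (by omega : g ≠ 0)
    cases h : pvLookup nodes n with
    | none => simp [preB_cnt, h]
    | some cs =>
      cases hcs : cs with
      | nil => simp [preB_cnt, h, hcs]
      | cons c cs' =>
        exfalso
        obtain ⟨hinv', _⟩ := pvInv_extend (c := c) nodes root hPre hinv hlast h (by rw [hcs]; exact List.mem_cons_self ..)
        have := pvInv_length nodes root hinv'
        have hlenp := pvInv_length nodes root hinv
        simp at this
        omega
  | succ k ih =>
    intro p n hk hinv hlast f g hf hg
    obtain ⟨f, rfl⟩ := Nat.exists_eq_succ_of_ne_zero (by omega : f ≠ 0)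
    obtain ⟨g, rfl⟩ := Nat.exists_eq_succ_of_ne_zero (by omega : g ≠ 0)
    cases h : pvLookup nodes n with
    | none => simp [preB_cnt, h]
    | some cs =>
      simp only [preB_cnt, h]
      rw [PySem.List.foldl_add_nat, PySem.List.foldl_add_nat]
      congr 2
      apply List.map_congr_left
      intro c hc
      obtain ⟨hinv', hlast'⟩ := pvInv_extend nodes root hPre hinv hlast h hc
      have hlen' := pvInv_length nodes root hinv'
      simp at hlen'
      have hlenp : 1 ≤ p.length := List.length_pos_iff.mpr hinv.1
      exact ih (p ++ [c]) c (by simp; omega) hinv' hlast' f g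
        (by simp; omega) (by simp; omega)

lemma pvCnt_pos (nodes : List (Int × List Int)) (f : Nat) (n : Int) :
    1 ≤ preB_cnt nodes f n := by
  cases f with
  | zero => simp [preB_cnt]
  | succ f =>
    cases h : pvLookup nodes n with
    | none => simp [preB_cnt, h]
    | some cs =>
      simp only [preB_cnt, h]
      rw [PySem.List.foldl_add_nat]
      omega

lemma preA_go_eq_pvE (nodes : List (Int × List Int)) :
    ∀ fuel n ord, preA_go nodes fuel n ord = ord ++ pvE nodes fuel n := by
  intro fuel
  induction fuel with
  | zero => intro n ord; simp [preA_go, pvE]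
  | succ fuel ih =>
    intro n ord
    simp only [preA_go, pvE]
    cases h : pvLookup nodes n with
    | none => simp
    | some cs =>
      simp only []
      clear h
      induction cs generalizing ord with
      | nil => simp
      | cons c cs' ihc =>
        simp only [List.foldl_cons, List.flatMap_cons]
        rw [ih c (ord ++ [(n, c)]), ihc]
        simp

-- a node reachable from the root along some valid path
def pvGood (nodes : List (Int × List Int)) (root : Int) (n : Int) : Prop :=
  ∃ p, pvInv nodes root p ∧ p.getLast? = some n

lemma preB_go_eq (nodes : List (Int × List Int)) (root : Int)
    (hPre : ∀ p ∈ nodes, (root = p.1 ∨ pvReach nodes nodes.length root p.1 = true) →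
      pvReach nodes nodes.length p.1 p.1 = false) :
    ∀ fuel fs ord,
      fuel = (fs.map (fun fr => preB_cnt nodes (nodes.length + 1) fr.2)).sum →
      (∀ fr ∈ fs, pvGood nodes root fr.2) →
      preB_go nodes fuel fs ord =
        ord ++ fs.flatMap (fun fr =>
          (match fr.1 with | some p => [(p, fr.2)] | none => ([] : List (Int × Int))) ++
          pvE nodes (nodes.length + 1) fr.2) := by
  intro fuel
  induction fuel with
  | zero =>
    intro fs ord hfuel _
    cases fs with
    | nil => simp [preB_go]
    | cons fr rest =>
      exfalso
      have := pvCnt_pos nodes (nodes.length + 1) fr.2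
      simp only [List.map_cons, List.sum_cons] at hfuel
      omega
  | succ fuel ih =>
    intro fs ord hfuel hgood
    cases fs with
    | nil => simp at hfuel
    | cons fr rest =>
      obtain ⟨popt, n⟩ := fr
      simp only [List.map_cons, List.sum_cons] at hfuel
      simp only [preB_go]
      obtain ⟨p, hinv, hlast⟩ := hgood (popt, n) (by simp)
      have hlenp : 1 ≤ p.length := List.length_pos_iff.mpr hinv.1
      have hplen : p.length ≤ nodes.length + 1 := pvInv_length nodes root hinv
      cases h : pvLookup nodes n with
      | none =>
        have hc1 : preB_cnt nodes (nodes.length + 1) n = 1 := by simp [preB_cnt, h]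
        rw [ih rest _ (by omega) (fun fr hfr => hgood fr (by simp [hfr]))]
        have hE : pvE nodes (nodes.length + 1) n = [] := by simp [pvE, h]
        cases popt <;> simp [hE]
      | some cs =>
        -- extended paths for the children
        have hext : ∀ c ∈ cs, pvInv nodes root (p ++ [c]) ∧ (p ++ [c]).getLast? = some c :=
          fun c hc => pvInv_extend nodes root hPre hinv hlast h hc
        have hstabOK : ∀ c ∈ cs, ∀ f g, nodes.length ≤ f → nodes.length ≤ g →
            pvE nodes f c = pvE nodes g c ∧ preB_cnt nodes f c = preB_cnt nodes g c := by
          intro c hc f g hf hg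
          obtain ⟨hinv', hlast'⟩ := hext c hc
          have hlen' := pvInv_length nodes root hinv'
          simp at hlen'
          constructor
          · exact pvE_stab nodes root hPre (nodes.length + 1) (p ++ [c]) c (by simp; omega)
              hinv' hlast' f g (by simp; omega) (by simp; omega)
          · exact pvCnt_stab nodes root hPre (nodes.length + 1) (p ++ [c]) c (by simp; omega)
              hinv' hlast' f g (by simp; omega) (by simp; omega)
        have hcnt : preB_cnt nodes (nodes.length + 1) n
            = 1 + (cs.map (preB_cnt nodes (nodes.length + 1))).sum := by
          simp only [preB_cnt, h]
          rw [PySem.List.foldl_add_nat]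
          congr 2
          apply List.map_congr_left
          intro c hc
          exact (hstabOK c hc nodes.length (nodes.length + 1) le_rfl (by omega)).2
        have hE : pvE nodes (nodes.length + 1) n
            = cs.flatMap (fun c => (n, c) :: pvE nodes (nodes.length + 1) c) := by
          rw [pvE]
          simp only [h]
          apply List.flatMap_congr
          intro c hc
          rw [(hstabOK c hc nodes.length (nodes.length + 1) le_rfl (by omega)).1]
        have hsum : fuel = (((cs.map (fun c => (some n, c)) ++ rest)).map
            (fun fr => preB_cnt nodes (nodes.length + 1) fr.2)).sum := by
          simp only [List.map_append, List.map_map, List.sum_append, Function.comp_def]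
          rw [show (fun x => preB_cnt nodes (nodes.length + 1) x)
            = preB_cnt nodes (nodes.length + 1) from rfl]
          omega
        have hgood' : ∀ fr ∈ cs.map (fun c => (some n, c)) ++ rest, pvGood nodes root fr.2 := by
          intro fr hfr
          rcases List.mem_append.mp hfr with h1 | h2
          · obtain ⟨c, hc, rfl⟩ := List.mem_map.mp h1
            exact ⟨p ++ [c], (hext c hc).1, (hext c hc).2⟩
          · exact hgood fr (by simp [h2])
        rw [ih _ _ hsum hgood']
        simp only [List.flatMap_append, List.flatMap_map, List.flatMap_cons, hE]
        cases popt <;> simp [List.append_assoc]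

-- ===== VERDICT (by name: the statement is the Claim_ definition above) =====
theorem preoder_traversal_tuples_py_spec : Claim_equal_preoder_traversal_tuples_py := by
  intro nodes root order _hDom hPre
  unfold Pre_preoder_traversal_tuples_py at hPre
  unfold Spec_preoder_traversal_tuples_py
  unfold preoder_traversal_tuples_py preoder_traversal_tuples_py_alt
  have hrootgood : pvGood nodes root root :=
    ⟨[root], ⟨by simp, by simp, by simp, by simp, by simp⟩, by simp⟩
  rw [preA_go_eq_pvE,
    preB_go_eq nodes root hPre _ [(none, root)] _ (by simp) (by
      intro fr hfr; simp at hfr; rw [hfr]; exact hrootgood)]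
  simp
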